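-- pv_equiv track=rewrite | github.com/eskeype/LeetCode | nqueens.py | new_queen_update_valid
-- ===== SOURCE A (Python) =====
-- def new_queen_update_valid(row,col,board,n):
-- 	new_board = set(board)
-- 	#get all dem bishes in dat row
-- 	for i in range(n):
-- 		new_board.discard((row,i))
-- 	#col
-- 	for i in range(n):
-- 		new_board.discard((i,col))
-- 	#diag 1
-- 	r = row
-- 	c = col
-- 	while r<n and c<n:
-- 		new_board.discard((r,c))
-- 		r+=1
-- 		c+=1
-- 	r = row
-- 	c = col
-- 	while r>=0 and c>=0:
-- 		new_board.discard((r,c))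
-- 		r-=1
-- 		c-=1
-- 	#diag 2
-- 	r = row
-- 	c = col
-- 	while r>=0 and c>=0 and r<n and c<n:
-- 		new_board.discard((r,c))
-- 		r+=1
-- 		c-=1
-- 	r = row
-- 	c = col
-- 	while r>=0 and c>=0 and r<n and c<n:
-- 		new_board.discard((r,c))
-- 		r-=1
-- 		c+=1
-- 	return new_board
-- ===== SOURCE B (Python) =====
-- def new_queen_update_valid(row, col, board, n):
--     # Keep exactly the cells the queen at (row, col) does not attack:
--     # same row, same column, or either diagonal.
--     return {(r, c) for (r, c) in board
--             if not (r == row or c == col or abs(r - row) == abs(c - col))}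
-- ===== Notes on version B (the rewrite author's own statement) =====
-- stated objective: faster
-- what changed: B replaces A's six attack-ray walks (two range(n) loops and four while-loop diagonal marches, each calling discard) with a single filtering pass over the board that keeps exactly the cells not on the queen's row, column or diagonals.
-- intended difference: When the queen or a board cell lies outside the n x n board, A's clipped/over-extended ray loops return a set that still contains attacked cells (e.g. same-row cells with column >= n) yet drops off-board cells on the extended main diagonal, while B removes exactly the cells on the queen's row, column or diagonals - the intended attack rule. — e.g. on new_queen_update_valid(0, 0, [(0, 2)], 2): A returns [(0, 2)], B returns []
import Mathlib
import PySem

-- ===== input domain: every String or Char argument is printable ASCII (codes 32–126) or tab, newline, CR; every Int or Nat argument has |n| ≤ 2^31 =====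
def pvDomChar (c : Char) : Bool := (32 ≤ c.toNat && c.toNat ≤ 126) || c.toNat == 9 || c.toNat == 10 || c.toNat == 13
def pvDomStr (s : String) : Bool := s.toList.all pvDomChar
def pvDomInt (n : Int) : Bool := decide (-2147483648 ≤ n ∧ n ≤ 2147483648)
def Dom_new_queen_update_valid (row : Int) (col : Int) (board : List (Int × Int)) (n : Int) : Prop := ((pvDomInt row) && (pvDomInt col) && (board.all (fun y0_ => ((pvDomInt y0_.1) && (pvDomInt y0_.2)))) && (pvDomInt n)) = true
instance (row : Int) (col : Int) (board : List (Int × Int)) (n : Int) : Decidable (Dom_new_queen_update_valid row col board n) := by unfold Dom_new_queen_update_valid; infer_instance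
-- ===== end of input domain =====

-- B replaces A's six attack-ray walks with one filtering pass over the board using the
-- plain attack rule (same row, column or diagonal); on inputs with the queen or a board
-- cell off the n×n board A's clipped rays differ, stated below as the intended difference D_.

-- ===== PORT A =====
-- while r<n and c<n: discard (r,c); r+=1; c+=1
def nquDiag1F (n r c : Int) (s : PySem.Set (Int × Int)) : PySem.Set (Int × Int) :=
  if r < n ∧ c < n then nquDiag1F n (r + 1) (c + 1) (PySem.Set.discard s (r, c)) else s
termination_by (n - r).toNat
decreasing_by omega

-- while r>=0 and c>=0: discard (r,c); r-=1; c-=1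
def nquDiag1B (r c : Int) (s : PySem.Set (Int × Int)) : PySem.Set (Int × Int) :=
  if 0 ≤ r ∧ 0 ≤ c then nquDiag1B (r - 1) (c - 1) (PySem.Set.discard s (r, c)) else s
termination_by (r + 1).toNat
decreasing_by omega

-- while r>=0 and c>=0 and r<n and c<n: discard (r,c); r+=1; c-=1
def nquDiag2F (n r c : Int) (s : PySem.Set (Int × Int)) : PySem.Set (Int × Int) :=
  if 0 ≤ r ∧ 0 ≤ c ∧ r < n ∧ c < n then nquDiag2F n (r + 1) (c - 1) (PySem.Set.discard s (r, c)) else s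
termination_by (n - r).toNat
decreasing_by omega

-- while r>=0 and c>=0 and r<n and c<n: discard (r,c); r-=1; c+=1
def nquDiag2B (n r c : Int) (s : PySem.Set (Int × Int)) : PySem.Set (Int × Int) :=
  if 0 ≤ r ∧ 0 ≤ c ∧ r < n ∧ c < n then nquDiag2B n (r - 1) (c + 1) (PySem.Set.discard s (r, c)) else s
termination_by (r + 1).toNat
decreasing_by omega

def new_queen_update_valid (row : Int) (col : Int) (board : List (Int × Int)) (n : Int) : List (Int × Int) :=
  let nb0 := PySem.Set.ofList board
  let nb1 := (PySem.List.pyRange 0 n 1).foldl (fun s i => PySem.Set.discard s (row, i)) nb0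
  let nb2 := (PySem.List.pyRange 0 n 1).foldl (fun s i => PySem.Set.discard s (i, col)) nb1
  let nb3 := nquDiag1F n row col nb2
  let nb4 := nquDiag1B row col nb3
  let nb5 := nquDiag2F n row col nb4
  nquDiag2B n row col nb5

-- ===== PORT B =====
-- the comprehension's test: r == row or c == col or abs(r - row) == abs(c - col)
def nquAttacked (row col : Int) (p : Int × Int) : Bool :=
  p.1 == row || p.2 == col || (p.1 - row).natAbs == (p.2 - col).natAbs

def new_queen_update_valid_alt (row : Int) (col : Int) (board : List (Int × Int)) (n : Int) : List (Int × Int) :=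
  PySem.Set.ofList (board.filter (fun p => ! nquAttacked row col p))

-- ===== PRECONDITION & SPEC =====
-- When the queen or a board cell lies outside the n×n board, A's clipped/over-extended
-- ray loops return a set that still contains attacked cells (e.g. same-row cells with
-- column ≥ n) yet drops off-board cells on the extended main diagonal, while B removes
-- exactly the cells on the queen's row, column or diagonals — the intended attack rule.
def D_new_queen_update_valid (row : Int) (col : Int) (board : List (Int × Int)) (n : Int) : Prop :=
  ∃ p ∈ board,
    ¬ ((p.1 = row ∨ p.2 = col ∨ (p.1 - row).natAbs = (p.2 - col).natAbs)
       ↔ ((p.1 = row ∧ 0 ≤ p.2 ∧ p.2 < n)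
          ∨ (p.2 = col ∧ 0 ≤ p.1 ∧ p.1 < n)
          ∨ (p.1 - row = p.2 - col ∧ ((row ≤ p.1 ∧ p.1 < n ∧ p.2 < n) ∨ (p.1 ≤ row ∧ 0 ≤ p.1 ∧ 0 ≤ p.2)))
          ∨ (p.1 + p.2 = row + col ∧ 0 ≤ row ∧ row < n ∧ 0 ≤ col ∧ col < n
              ∧ 0 ≤ p.1 ∧ p.1 < n ∧ 0 ≤ p.2 ∧ p.2 < n)))
instance (row : Int) (col : Int) (board : List (Int × Int)) (n : Int) : Decidable (D_new_queen_update_valid row col board n) := by unfold D_new_queen_update_valid; infer_instance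

def Spec_new_queen_update_valid (row : Int) (col : Int) (board : List (Int × Int)) (n : Int) (out : List (Int × Int)) : Prop := ¬ D_new_queen_update_valid row col board n → out = new_queen_update_valid_alt row col board n
instance (row : Int) (col : Int) (board : List (Int × Int)) (n : Int) (out : List (Int × Int)) : Decidable (Spec_new_queen_update_valid row col board n out) := by unfold Spec_new_queen_update_valid; infer_instance

def pvDiffWitness_new_queen_update_valid : Int × Int × (List (Int × Int)) × Int := (0, 0, [(0, 2)], 2)
def pvDiffWitnessOut_new_queen_update_valid : (List (Int × Int)) × (List (Int × Int)) := ([(0, 2)], [])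

-- ===== CLAIM (what is proved, stated in full; the proofs are below) =====
def Claim_unchanged_new_queen_update_valid : Prop := ∀ (row : Int) (col : Int) (board : List (Int × Int)) (n : Int), Dom_new_queen_update_valid row col board n → Spec_new_queen_update_valid row col board n (new_queen_update_valid row col board n)
def Claim_changed_new_queen_update_valid : Prop := Dom_new_queen_update_valid (pvDiffWitness_new_queen_update_valid.1) (pvDiffWitness_new_queen_update_valid.2.1) (pvDiffWitness_new_queen_update_valid.2.2.1) (pvDiffWitness_new_queen_update_valid.2.2.2) ∧ D_new_queen_update_valid (pvDiffWitness_new_queen_update_valid.1) (pvDiffWitness_new_queen_update_valid.2.1) (pvDiffWitness_new_queen_update_valid.2.2.1) (pvDiffWitness_new_queen_update_valid.2.2.2) ∧ new_queen_update_valid (pvDiffWitness_new_queen_update_valid.1) (pvDiffWitness_new_queen_update_valid.2.1) (pvDiffWitness_new_queen_update_valid.2.2.1) (pvDiffWitness_new_queen_update_valid.2.2.2) = pvDiffWitnessOut_new_queen_update_valid.1 ∧ new_queen_update_valid_alt (pvDiffWitness_new_queen_update_valid.1) (pvDiffWitness_new_queen_update_valid.2.1) (pvDiffWitness_new_queen_update_valid.2.2.1)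 (pvDiffWitness_new_queen_update_valid.2.2.2) = pvDiffWitnessOut_new_queen_update_valid.2 ∧ pvDiffWitnessOut_new_queen_update_valid.1 ≠ pvDiffWitnessOut_new_queen_update_valid.2
def Claim_exact_new_queen_update_valid : Prop := ∀ (row : Int) (col : Int) (board : List (Int × Int)) (n : Int), Dom_new_queen_update_valid row col board n → D_new_queen_update_valid row col board n → new_queen_update_valid row col board n ≠ new_queen_update_valid_alt row col board n

-- ===== LEMMAS AND PROOFS =====

-- A's clipped attack test, as one Boolean (only the proofs use it)
def nquAttA (row col n : Int) (p : Int × Int) : Bool :=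
  decide ((p.1 = row ∧ 0 ≤ p.2 ∧ p.2 < n)
    ∨ (p.2 = col ∧ 0 ≤ p.1 ∧ p.1 < n)
    ∨ (p.1 - row = p.2 - col ∧ ((row ≤ p.1 ∧ p.1 < n ∧ p.2 < n) ∨ (p.1 ≤ row ∧ 0 ≤ p.1 ∧ 0 ≤ p.2)))
    ∨ (p.1 + p.2 = row + col ∧ 0 ≤ row ∧ row < n ∧ 0 ≤ col ∧ col < n
        ∧ 0 ≤ p.1 ∧ p.1 < n ∧ 0 ≤ p.2 ∧ p.2 < n))

-- each discard is a filter, so each of A's stages is a filter with a closed-form predicate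

theorem nquDiag1F_eq (n r c : Int) (s : PySem.Set (Int × Int)) :
    nquDiag1F n r c s = s.filter (fun p => ! decide (r ≤ p.1 ∧ p.1 < n ∧ p.2 < n ∧ p.1 - r = p.2 - c)) := by
  fun_induction nquDiag1F with
  | case1 r c s h ih =>
    rw [ih, PySem.Set.discard, List.filter_filter]
    refine List.filter_congr fun a _ => ?_
    rcases a with ⟨x, y⟩
    rw [Bool.eq_iff_iff]
    simp only [Bool.and_eq_true, Bool.not_eq_true', Bool.not_eq_true, decide_eq_false_iff_not,
      decide_eq_true_eq, beq_iff_eq, beq_eq_false_iff_ne, ne_eq, Prod.mk.injEq, not_and, not_or,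
      not_le, not_lt]
    omega
  | case2 r c s h =>
    rw [eq_comm, List.filter_eq_self]
    intro a _
    rcases a with ⟨x, y⟩
    simp only [Bool.not_eq_true', decide_eq_false_iff_not, not_and, not_or, not_le, not_lt]
    omega

theorem nquDiag1B_eq (r c : Int) (s : PySem.Set (Int × Int)) :
    nquDiag1B r c s = s.filter (fun p => ! decide (p.1 ≤ r ∧ 0 ≤ p.1 ∧ 0 ≤ p.2 ∧ p.1 - r = p.2 - c)) := by
  fun_induction nquDiag1B with
  | case1 r c s h ih =>
    rw [ih, PySem.Set.discard, List.filter_filter]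
    refine List.filter_congr fun a _ => ?_
    rcases a with ⟨x, y⟩
    rw [Bool.eq_iff_iff]
    simp only [Bool.and_eq_true, Bool.not_eq_true', Bool.not_eq_true, decide_eq_false_iff_not,
      decide_eq_true_eq, beq_iff_eq, beq_eq_false_iff_ne, ne_eq, Prod.mk.injEq, not_and, not_or,
      not_le, not_lt]
    omega
  | case2 r c s h =>
    rw [eq_comm, List.filter_eq_self]
    intro a _
    rcases a with ⟨x, y⟩
    simp only [Bool.not_eq_true', decide_eq_false_iff_not, not_and, not_or, not_le, not_lt]
    omega

theorem nquDiag2F_eq (n r c : Int) (s : PySem.Set (Int × Int)) :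
    nquDiag2F n r c s = s.filter (fun p => ! decide (0 ≤ r ∧ r < n ∧ 0 ≤ c ∧ c < n ∧ r ≤ p.1 ∧ p.1 < n ∧ 0 ≤ p.2 ∧ p.1 - r = c - p.2)) := by
  fun_induction nquDiag2F with
  | case1 r c s h ih =>
    rw [ih, PySem.Set.discard, List.filter_filter]
    refine List.filter_congr fun a _ => ?_
    rcases a with ⟨x, y⟩
    rw [Bool.eq_iff_iff]
    simp only [Bool.and_eq_true, Bool.not_eq_true', Bool.not_eq_true, decide_eq_false_iff_not,
      decide_eq_true_eq, beq_iff_eq, beq_eq_false_iff_ne, ne_eq, Prod.mk.injEq, not_and, not_or,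
      not_le, not_lt]
    omega
  | case2 r c s h =>
    rw [eq_comm, List.filter_eq_self]
    intro a _
    rcases a with ⟨x, y⟩
    simp only [Bool.not_eq_true', decide_eq_false_iff_not, not_and, not_or, not_le, not_lt]
    omega

theorem nquDiag2B_eq (n r c : Int) (s : PySem.Set (Int × Int)) :
    nquDiag2B n r c s = s.filter (fun p => ! decide (0 ≤ r ∧ r < n ∧ 0 ≤ c ∧ c < n ∧ p.1 ≤ r ∧ 0 ≤ p.1 ∧ p.2 < n ∧ p.1 - r = c - p.2)) := by
  fun_induction nquDiag2B with
  | case1 r c s h ih =>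
    rw [ih, PySem.Set.discard, List.filter_filter]
    refine List.filter_congr fun a _ => ?_
    rcases a with ⟨x, y⟩
    rw [Bool.eq_iff_iff]
    simp only [Bool.and_eq_true, Bool.not_eq_true', Bool.not_eq_true, decide_eq_false_iff_not,
      decide_eq_true_eq, beq_iff_eq, beq_eq_false_iff_ne, ne_eq, Prod.mk.injEq, not_and, not_or,
      not_le, not_lt]
    omega
  | case2 r c s h =>
    rw [eq_comm, List.filter_eq_self]
    intro a _
    rcases a with ⟨x, y⟩
    simp only [Bool.not_eq_true', decide_eq_false_iff_not, not_and, not_or, not_le, not_lt]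
    omega

-- the row loop: discarding (row, i) for i in range(a, n)
theorem nquRowFold_eq (row n : Int) : ∀ (k : Nat) (a : Int), (n - a).toNat = k →
    ∀ (s : PySem.Set (Int × Int)),
    (PySem.List.pyRange a n 1).foldl (fun s i => PySem.Set.discard s (row, i)) s
      = s.filter (fun p => ! decide (p.1 = row ∧ a ≤ p.2 ∧ p.2 < n)) := by
  intro k
  induction k with
  | zero =>
    intro a ha s
    rw [PySem.List.pyRange_one, ha, eq_comm]
    simp only [List.range_zero, List.map_nil, List.foldl_nil, List.filter_eq_self]
    intro a2 _
    rcases a2 with ⟨x, y⟩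
    simp only [Bool.not_eq_true', decide_eq_false_iff_not, not_and, not_le, not_lt]
    omega
  | succ k ih =>
    intro a ha s
    rw [PySem.List.pyRange_one_cons (by omega), List.foldl_cons,
      ih (a + 1) (by omega), PySem.Set.discard, List.filter_filter]
    refine List.filter_congr fun a _ => ?_
    rcases a with ⟨x, y⟩
    rw [Bool.eq_iff_iff]
    simp only [Bool.and_eq_true, Bool.not_eq_true', Bool.not_eq_true, decide_eq_false_iff_not,
      decide_eq_true_eq, beq_iff_eq, beq_eq_false_iff_ne, ne_eq, Prod.mk.injEq, not_and, not_or,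
      not_le, not_lt]
    omega

-- the column loop: discarding (i, col) for i in range(a, n)
theorem nquColFold_eq (col n : Int) : ∀ (k : Nat) (a : Int), (n - a).toNat = k →
    ∀ (s : PySem.Set (Int × Int)),
    (PySem.List.pyRange a n 1).foldl (fun s i => PySem.Set.discard s (i, col)) s
      = s.filter (fun p => ! decide (p.2 = col ∧ a ≤ p.1 ∧ p.1 < n)) := by
  intro k
  induction k with
  | zero =>
    intro a ha s
    rw [PySem.List.pyRange_one, ha, eq_comm]
    simp only [List.range_zero, List.map_nil, List.foldl_nil, List.filter_eq_self]
    intro a2 _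
    rcases a2 with ⟨x, y⟩
    simp only [Bool.not_eq_true', decide_eq_false_iff_not, not_and, not_le, not_lt]
    omega
  | succ k ih =>
    intro a ha s
    rw [PySem.List.pyRange_one_cons (by omega), List.foldl_cons,
      ih (a + 1) (by omega), PySem.Set.discard, List.filter_filter]
    refine List.filter_congr fun a _ => ?_
    rcases a with ⟨x, y⟩
    rw [Bool.eq_iff_iff]
    simp only [Bool.and_eq_true, Bool.not_eq_true', Bool.not_eq_true, decide_eq_false_iff_not,
      decide_eq_true_eq, beq_iff_eq, beq_eq_false_iff_ne, ne_eq, Prod.mk.injEq, not_and, not_or,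
      not_le, not_lt]
    omega

-- discarding one element commutes with a filtering pass
theorem nquDiscard_filter (q : Int × Int → Bool) (s : PySem.Set (Int × Int)) (x : Int × Int) :
    PySem.Set.discard (s.filter q) x = (PySem.Set.discard s x).filter q := by
  rw [PySem.Set.discard, PySem.Set.discard, List.filter_filter, List.filter_filter]
  exact List.filter_congr fun a _ => Bool.and_comm _ _

theorem nquFilter_discard_of_neg (q : Int × Int → Bool) (s : PySem.Set (Int × Int)) (x : Int × Int)
    (hq : q x = false) : (PySem.Set.discard s x).filter q = s.filter q := by
  rw [PySem.Set.discard, List.filter_filter]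
  refine List.filter_congr fun a _ => ?_
  rcases eq_or_ne a x with rfl | hne
  · simp [hq]
  · simp [hne]

-- set(filter) = filter(set): dedup commutes with a filtering pass
theorem nquOfList_filter (q : Int × Int → Bool) : ∀ (l : List (Int × Int)),
    PySem.Set.ofList (l.filter q) = (PySem.Set.ofList l).filter q := by
  intro l
  induction l with
  | nil => rfl
  | cons x xs ih =>
    rw [PySem.Set.ofList_cons]
    cases hq : q x
    · rw [List.filter_cons_of_neg (by simp [hq]), List.filter_cons_of_neg (by simp [hq]), ih,
        nquFilter_discard_of_neg q _ x hq]
    · rw [List.filter_cons_of_pos hq, List.filter_cons_of_pos hq, PySem.Set.ofList_cons, ih,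
        nquDiscard_filter]

-- A as a single filtering pass with A's clipped attack test
theorem nquA_eq (row col : Int) (board : List (Int × Int)) (n : Int) :
    new_queen_update_valid row col board n
      = (PySem.Set.ofList board).filter (fun p => ! nquAttA row col n p) := by
  unfold new_queen_update_valid
  dsimp only
  rw [nquRowFold_eq row n (n - 0).toNat 0 rfl, nquColFold_eq col n (n - 0).toNat 0 rfl,
    nquDiag1F_eq, nquDiag1B_eq, nquDiag2F_eq, nquDiag2B_eq,
    List.filter_filter, List.filter_filter, List.filter_filter, List.filter_filter,
    List.filter_filter]
  refine List.filter_congr fun a _ => ?_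
  rcases a with ⟨x, y⟩
  rw [Bool.eq_iff_iff]
  simp only [nquAttA, Bool.and_eq_true, Bool.not_eq_true', decide_eq_false_iff_not,
    not_and, not_or, not_le, not_lt]
  omega

-- B as the same filtering pass with the plain attack test
theorem nquB_eq (row col : Int) (board : List (Int × Int)) (n : Int) :
    new_queen_update_valid_alt row col board n
      = (PySem.Set.ofList board).filter (fun p => ! nquAttacked row col p) := by
  unfold new_queen_update_valid_alt
  exact nquOfList_filter _ board

-- ===== VERDICT (by name: the statements are the Claim_ definitions above) =====
theorem new_queen_update_valid_spec : Claim_unchanged_new_queen_update_valid := by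
  intro row col board n _ hD
  rw [nquA_eq, nquB_eq]
  refine List.filter_congr fun p hp => ?_
  have hpb : p ∈ board := (PySem.Set.mem_ofList board p).mp hp
  have h := of_not_not (fun hiff => hD ⟨p, hpb, hiff⟩)
  have hb : nquAttacked row col p
      = decide (p.1 = row ∨ p.2 = col ∨ (p.1 - row).natAbs = (p.2 - col).natAbs) := by
    rw [Bool.eq_iff_iff]
    simp [nquAttacked, or_assoc]
  have ha : nquAttA row col n p = nquAttacked row col p := by
    rw [hb]
    simp only [nquAttA]
    rw [decide_eq_decide]
    exact h.symm
  rw [ha]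

theorem nquA_at_witness : new_queen_update_valid 0 0 [(0, 2)] 2 = [(0, 2)] := by
  rw [nquA_eq]
  decide

theorem new_queen_update_valid_changed : Claim_changed_new_queen_update_valid := by
  unfold Claim_changed_new_queen_update_valid
  exact ⟨by decide, by decide, nquA_at_witness, by decide, by decide⟩

theorem new_queen_update_valid_tight : Claim_exact_new_queen_update_valid := by
  intro row col board n _ hD heq
  obtain ⟨p, hpb, hne⟩ := hD
  apply hne
  have hp : p ∈ PySem.Set.ofList board := (PySem.Set.mem_ofList board p).mpr hpb
  rw [nquA_eq, nquB_eq] at heq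
  have h1 : (p ∈ (PySem.Set.ofList board).filter (fun q => ! nquAttA row col n q))
      ↔ (p ∈ (PySem.Set.ofList board).filter (fun q => ! nquAttacked row col q)) := by
    rw [heq]
  clear heq
  rw [List.mem_filter, List.mem_filter] at h1
  simp only [hp, true_and] at h1
  have hab : nquAttA row col n p = nquAttacked row col p :=
    Bool.not_inj (Bool.eq_iff_iff.mpr h1)
  have hb : nquAttacked row col p
      = decide (p.1 = row ∨ p.2 = col ∨ (p.1 - row).natAbs = (p.2 - col).natAbs) := by
    rw [Bool.eq_iff_iff]
    simp [nquAttacked, or_assoc]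
  rw [hb] at hab
  simp only [nquAttA] at hab
  exact (decide_eq_decide.mp hab).symm
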